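-- pv_equiv track=rewrite | github.com/noroot777/x-bookmarks-sync | skills/url-to-obsidian/scripts/generate_url_obsidian_notes.py | format_summary_lines
-- ===== SOURCE A (Python) =====
-- def format_summary_lines(summary_lines):
--     clean = []
--     for line in summary_lines:
--         text = str(line).strip().removeprefix("- ").strip()
--         if not text or text in clean:
--             continue
--         clean.append(text)
--         if len(clean) >= 3:
--             break
--     return "\n".join(f"- {part}" for part in clean)
-- ===== SOURCE B (Python) =====
-- def format_summary_lines(summary_lines):
--     # Repeated-search: for each of the (up to) 3 output slots, rescan the input
--     # for the first cleaned non-empty text not already chosen.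
--     def next_distinct(chosen):
--         for line in summary_lines:
--             text = str(line).strip().removeprefix("- ").strip()
--             if text and text not in chosen:
--                 return text
--         return None
--
--     chosen = []
--     for _ in range(3):
--         t = next_distinct(chosen)
--         if t is None:
--             break
--         chosen.append(t)
--     return "\n".join(f"- {part}" for part in chosen)
-- ===== Notes on version B (the rewrite author's own statement) =====
-- stated objective: alternative
-- what changed: Replaces A's single stateful pass (dedup accumulator with early break) by a repeated-search algorithm: for each of the up-to-3 output slots B rescans the whole input for the first cleaned non-empty text not yet chosen.
import Mathlib
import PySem

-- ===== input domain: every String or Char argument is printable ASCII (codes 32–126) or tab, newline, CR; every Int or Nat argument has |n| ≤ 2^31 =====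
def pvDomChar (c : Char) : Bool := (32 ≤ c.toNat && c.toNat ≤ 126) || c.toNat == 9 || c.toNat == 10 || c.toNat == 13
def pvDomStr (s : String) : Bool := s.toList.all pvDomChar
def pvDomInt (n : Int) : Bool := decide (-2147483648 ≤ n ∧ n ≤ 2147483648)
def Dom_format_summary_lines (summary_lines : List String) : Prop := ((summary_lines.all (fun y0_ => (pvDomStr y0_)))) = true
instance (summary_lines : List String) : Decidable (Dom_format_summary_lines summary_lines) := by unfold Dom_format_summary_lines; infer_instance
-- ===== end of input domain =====

-- B replaces A's single stateful pass (dedup list + early break) by a repeated-search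
-- algorithm: for each of the up-to-3 output slots it rescans the whole input for the
-- first cleaned non-empty text not yet chosen; objective: alternative, not faster.
-- ===== PORT A =====
-- str.removeprefix has no PySem primitive: ported by hand, exact (drops the prefix once if present).
def pvRemoveprefix (s p : String) : String :=
  if PySem.Str.startswith s p then PySem.Str.slice s (some ((PySem.Str.len p : Int))) none else s

def pvClean (line : String) : String :=
  PySem.Str.strip (pvRemoveprefix (PySem.Str.strip line) "- ")

def pvLoopA : List String → List String → List String
  | [], clean => clean
  | line :: rest, clean =>
    let text := pvClean line
    if text = "" ∨ text ∈ clean then pvLoopA rest clean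
    else
      let clean' := clean ++ [text]
      if 3 ≤ clean'.length then clean' else pvLoopA rest clean'

def format_summary_lines (summary_lines : List String) : String :=
  PySem.Str.join "\n" ((pvLoopA summary_lines []).map (fun part => "- " ++ part))

-- ===== PORT B =====
-- next_distinct: first cleaned non-empty text of summary_lines that is not in chosen.
def pvNextDistinct (chosen : List String) : List String → Option String
  | [] => none
  | line :: rest =>
    let text := pvClean line
    if text ≠ "" ∧ text ∉ chosen then some text else pvNextDistinct chosen rest

-- the 'for _ in range(3)' loop with its early break, as fuel recursion
def pvLoopB (summary_lines : List String) : Nat → List String → List String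
  | 0, chosen => chosen
  | fuel + 1, chosen =>
    match pvNextDistinct chosen summary_lines with
    | none => chosen
    | some t => pvLoopB summary_lines fuel (chosen ++ [t])

def format_summary_lines_alt (summary_lines : List String) : String :=
  PySem.Str.join "\n" ((pvLoopB summary_lines 3 []).map (fun part => "- " ++ part))

-- ===== PRECONDITION & SPEC =====
def Spec_format_summary_lines (summary_lines : List String) (out : String) : Prop := out = format_summary_lines_alt summary_lines
instance (summary_lines : List String) (out : String) : Decidable (Spec_format_summary_lines summary_lines out) := by unfold Spec_format_summary_lines; infer_instance

-- ===== CLAIM (what is proved, stated in full; the proofs are below) =====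
def Claim_equal_format_summary_lines : Prop := ∀ (summary_lines : List String), Dom_format_summary_lines summary_lines → Spec_format_summary_lines summary_lines (format_summary_lines summary_lines)

-- ===== LEMMAS AND PROOFS =====

-- L ts = the cleaned, non-empty texts in order; D ts = its ordered dedup.
def pvL (ts : List String) : List String := (ts.map pvClean).filter (fun t => t ≠ "")
def pvD (ts : List String) : List String := PySem.Set.ofList (pvL ts)

-- One folding step of A: skip empty cleaned text, otherwise set-add it (first occurrence kept).
def pvStep (s : List String) (t : String) : List String :=
  if pvClean t = "" then s else PySem.Set.add s (pvClean t)

theorem pvFoldl_step_eq_update (ts : List String) (s : PySem.Set String) :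
    ts.foldl pvStep s = PySem.Set.update s (pvL ts) := by
  induction ts generalizing s with
  | nil => simp [PySem.Set.update, pvL]
  | cons t ts ih =>
    by_cases h : pvClean t = ""
    · simp [pvStep, h, ih, pvL]
    · simp [pvStep, h, ih, pvL, PySem.Set.update_cons]

theorem pvFoldl_step_prefix (ts : List String) (s : List String) :
    ∃ ex, ts.foldl pvStep s = s ++ ex := by
  induction ts generalizing s with
  | nil => exact ⟨[], by simp⟩
  | cons t ts ih =>
    by_cases h : pvClean t = ""
    · simpa [pvStep, h] using ih s
    · by_cases hm : pvClean t ∈ s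
      · simpa [pvStep, h, PySem.Set.add_of_mem hm] using ih s
      · obtain ⟨ex, hex⟩ := ih (s ++ [pvClean t])
        exact ⟨pvClean t :: ex, by
          simp [pvStep, h, PySem.Set.add_of_not_mem hm, hex]⟩

theorem pvLoopA_eq_take (ts : List String) (clean : List String)
    (hlen : clean.length < 3) :
    pvLoopA ts clean = (ts.foldl pvStep clean).take 3 := by
  induction ts generalizing clean with
  | nil => simp [pvLoopA, List.take_of_length_le (by omega : clean.length ≤ 3)]
  | cons t ts ih =>
    by_cases h : pvClean t = "" ∨ pvClean t ∈ clean
    · have hstep : pvStep clean t = clean := by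
        rcases h with h | h
        · simp [pvStep, h]
        · by_cases h0 : pvClean t = ""
          · simp [pvStep, h0]
          · simp [pvStep, h0, PySem.Set.add_of_mem h]
      simp only [pvLoopA, List.foldl_cons, hstep]
      rw [if_pos h]
      exact ih clean hlen
    · rw [not_or] at h
      obtain ⟨h0, hm⟩ := h
      have hstep : pvStep clean t = clean ++ [pvClean t] := by
        simp [pvStep, h0, PySem.Set.add_of_not_mem hm]
      simp only [pvLoopA, List.foldl_cons, hstep]
      rw [if_neg (not_or.mpr ⟨h0, hm⟩)]
      by_cases h3 : 3 ≤ (clean ++ [pvClean t]).length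
      · have hlen3 : (clean ++ [pvClean t]).length = 3 := by
          simp at h3 ⊢; omega
        obtain ⟨ex, hex⟩ := pvFoldl_step_prefix ts (clean ++ [pvClean t])
        rw [if_pos h3, hex, ← hlen3, List.take_left]
      · rw [if_neg h3]
        exact ih _ (by simp at h3 ⊢; omega)

theorem pvLoopA_eq_D_take (ts : List String) :
    pvLoopA ts [] = (pvD ts).take 3 := by
  rw [pvLoopA_eq_take ts [] (by simp), pvFoldl_step_eq_update]
  rfl

-- B side: next_distinct is find? over the cleaned non-empty texts.
theorem pvNextDistinct_eq_find (ts chosen : List String) :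
    pvNextDistinct chosen ts = (pvL ts).find? (fun t => decide (t ∉ chosen)) := by
  induction ts with
  | nil => simp [pvNextDistinct, pvL]
  | cons t ts ih =>
    by_cases h0 : pvClean t = ""
    · simp [pvNextDistinct, h0, pvL, ih]
    · by_cases hm : pvClean t ∈ chosen
      · simp [pvNextDistinct, h0, hm, pvL, ih]
      · simp [pvNextDistinct, h0, hm, pvL]

theorem pvFind_congr (L : List String) (p q : String → Bool)
    (h : ∀ t ∈ L, p t = q t) : L.find? p = L.find? q := by
  induction L with
  | nil => rfl
  | cons x L ih =>
    simp only [List.find?, h x (by simp)]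
    cases q x
    · exact ih fun t ht => h t (by simp [ht])
    · rfl

-- find? of a value-predicate is unchanged by ordered dedup.
theorem pvFind_dedup (L : List String) (p : String → Bool) :
    L.find? p = (PySem.Set.ofList L).find? p := by
  induction L using List.reverseRecOn with
  | nil => rfl
  | append_singleton L x ih =>
    by_cases hm : x ∈ PySem.Set.ofList L
    · have hx : x ∈ L := (PySem.Set.mem_ofList _ _).1 hm
      rw [PySem.Set.ofList_append_singleton, PySem.Set.add_of_mem hm, ← ih]
      rcases hfx : L.find? p with _ | v
      · rw [List.find?_append, hfx]
        have := List.find?_eq_none.1 hfx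
        simp [List.find?, this x hx]
      · rw [List.find?_append, hfx]; rfl
    · rw [PySem.Set.ofList_append_singleton, PySem.Set.add_of_not_mem hm,
        List.find?_append, List.find?_append, ih]

-- on a nodup list, the first element not among the first k is element k
theorem pvFind_not_take (D : List String) (k : Nat) (hnd : D.Nodup) :
    D.find? (fun t => decide (t ∉ D.take k)) = (D.drop k).head? := by
  induction k generalizing D with
  | zero => cases D <;> simp [List.find?]
  | succ k ih =>
    cases D with
    | nil => rfl
    | cons d D =>
      simp only [List.take_succ_cons, List.drop_succ_cons]
      rw [List.find?_cons_of_neg (by simp)]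
      have hnd' : D.Nodup := (List.nodup_cons.1 hnd).2
      have hdD : d ∉ D := (List.nodup_cons.1 hnd).1
      have : D.find? (fun t => decide (t ∉ d :: D.take k))
           = D.find? (fun t => decide (t ∉ D.take k)) := by
        apply pvFind_congr
        intro t ht
        have : t ≠ d := fun h => hdD (h ▸ ht)
        simp [this]
      exact this.trans (ih D hnd')

theorem pvLoopB_take (ts : List String) (fuel k : Nat) (hk : k ≤ (pvD ts).length) :
    pvLoopB ts fuel ((pvD ts).take k) = (pvD ts).take (k + fuel) := by
  induction fuel generalizing k with
  | zero => rfl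
  | succ fuel ih =>
    have hnd : (pvD ts).Nodup := PySem.Set.nodup_ofList _
    have hfind : pvNextDistinct ((pvD ts).take k) ts = ((pvD ts).drop k).head? := by
      rw [pvNextDistinct_eq_find, pvFind_dedup]
      exact pvFind_not_take (pvD ts) k hnd
    rcases hdrop : ((pvD ts).drop k).head? with _ | v
    · have hlen : (pvD ts).length ≤ k := by
        have := List.head?_eq_none_iff.1 hdrop
        have := List.drop_eq_nil_iff.1 this
        omega
      have hk' : k = (pvD ts).length := le_antisymm hk hlen
      simp only [pvLoopB, hfind, hdrop]
      rw [hk', List.take_of_length_le (le_refl _), List.take_of_length_le (by omega)]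
    · have hlt : k < (pvD ts).length := by
        by_contra h
        rw [List.drop_eq_nil_iff.2 (by omega)] at hdrop
        simp at hdrop
      have hv : (pvD ts)[k]? = some v := by
        rwa [← List.head?_drop]
      have hconcat : (pvD ts).take k ++ [v] = (pvD ts).take (k + 1) := by
        rw [List.take_add_one, hv]
        simp [Option.toList]
      simp only [pvLoopB, hfind, hdrop, hconcat]
      rw [ih (k + 1) (by omega)]
      ring_nf

theorem pvLoopB_eq_D_take (ts : List String) :
    pvLoopB ts 3 [] = (pvD ts).take 3 := by
  have := pvLoopB_take ts 3 0 (Nat.zero_le _)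
  simpa using this

-- ===== VERDICT (by name: the statement is the Claim_ definition above) =====
theorem format_summary_lines_spec : Claim_equal_format_summary_lines := by
  intro summary_lines _
  unfold Spec_format_summary_lines format_summary_lines format_summary_lines_alt
  rw [pvLoopA_eq_D_take, pvLoopB_eq_D_take]
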